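-- pv_equiv track=rewrite | github.com/updaun/CodingTest | programmers/2023/230207_1.py | solution
-- ===== SOURCE A (Python) =====
-- import heapq
-- import heapq
--
-- def solution(scoville, K):
--     answer = 0
--     heapq.heapify(scoville)
--     while scoville[0]<K:
--         food_a = heapq.heappop(scoville)
--         food_b = heapq.heappop(scoville)
--         heapq.heappush(scoville, food_b*2+food_a)
--         answer += 1
--         if len(scoville) == 1 and scoville[0] < K:
--             return -1
--     return answer
-- ===== SOURCE B (Python) =====
-- def solution(scoville, K):
--     # Two-queue merge: after sorting once, every newly mixed value is >= every
--     # value still waiting in the 'merged' queue, so the queue of mixed values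
--     # stays sorted by construction and a plain FIFO (an append-only list with a
--     # front pointer) replaces the priority queue.  O(n log n) sort + O(n) loop.
--     xs = sorted(scoville)
--     merged = []
--     i = 0  # front of the sorted-input queue
--     j = 0  # front of the merged-values queue
--     answer = 0
--     while True:
--         m = merged[j] if i == len(xs) else (xs[i] if j == len(merged) else min(xs[i], merged[j]))
--         if m >= K:
--             return answer
--         if i == len(xs) or (j < len(merged) and merged[j] < xs[i]):
--             a = merged[j]; j += 1
--         else:
--             a = xs[i]; i += 1
--         if i == len(xs) or (j < len(merged) and merged[j] < xs[i]):
--             b = merged[j]; j += 1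
--         else:
--             b = xs[i]; i += 1
--         merged.append(b * 2 + a)
--         answer += 1
--         if (len(xs) - i) + (len(merged) - j) == 1:
--             if (xs[i] if i < len(xs) else merged[j]) < K:
--                 return -1
-- ===== Notes on version B (the rewrite author's own statement) =====
-- stated objective: alternative
-- what changed: Replaces the priority queue entirely with a two-queue linear merge: sort once, then keep mixed values in a plain FIFO (append-only list with a front pointer) -- each new mixed value is provably >= everything still queued, so the minimum is always the smaller of the two queue fronts and no heap/insort/resort is ever needed.
import Mathlib
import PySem

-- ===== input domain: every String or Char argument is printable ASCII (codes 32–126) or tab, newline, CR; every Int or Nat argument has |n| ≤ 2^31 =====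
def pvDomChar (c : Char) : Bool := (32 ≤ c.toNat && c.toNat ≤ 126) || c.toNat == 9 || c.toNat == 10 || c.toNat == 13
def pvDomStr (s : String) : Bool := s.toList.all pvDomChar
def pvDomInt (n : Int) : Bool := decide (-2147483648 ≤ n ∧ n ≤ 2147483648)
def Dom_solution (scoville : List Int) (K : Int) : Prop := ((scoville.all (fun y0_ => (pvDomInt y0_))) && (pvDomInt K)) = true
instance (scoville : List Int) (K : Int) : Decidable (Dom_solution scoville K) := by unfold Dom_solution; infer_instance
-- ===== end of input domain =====

-- B replaces A's binary heap by a one-sort two-queue linear merge (mixed values go to a FIFO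
-- whose order is maintained by construction); same return value wherever A returns (Pre_
-- excludes A's IndexError inputs). Both Pythons mutate/consume their list state in place;
-- the equivalence proved here is about the RETURN value only.


-- ===== PORT A =====
-- The heapq calls are ported by their contract: heapify arranges the list so that the minimum is
-- at index 0, heappop removes and returns the minimum, heappush adds an element.  A observes the
-- heap ONLY through scoville[0] (= the minimum), heappop and len, so reading the minimum with
-- PySem.List.min? and erasing its first occurrence is exact for A's return value.  The `none`
-- fallthrough branches (value 0) are the inputs where Python A raises IndexError; they are
-- excluded by Pre_solution below.
def solGoA (h : List Int) (K : Int) (answer : Int) : Int :=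
  match hmm : PySem.List.min? h (fun x => x) with    -- scoville[0] (root of the heap)
  | none => 0                                        -- IndexError: empty heap (outside Pre_)
  | some m =>
    if m < K then
      let h1 := h.erase m                            -- food_a = heapq.heappop(scoville)
      match hmm2 : PySem.List.min? h1 (fun x => x) with
      | none => 0                                    -- IndexError: heappop of empty (outside Pre_)
      | some m2 =>
        let h2 := (h1.erase m2) ++ [m2 * 2 + m]      -- food_b = heappop; heappush(food_b*2+food_a)
        if h2.length = 1 ∧ h2.headD 0 < K then -1    -- if len(scoville)==1 and scoville[0]<K
        else solGoA h2 K (answer + 1)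
    else answer
termination_by h.length
decreasing_by
  have hm : m ∈ h := PySem.List.min?_mem hmm
  have hm2 : m2 ∈ h.erase m := PySem.List.min?_mem hmm2
  have h1 : (h.erase m).length = h.length - 1 := List.length_erase_of_mem hm
  have h2 : ((h.erase m).erase m2).length = (h.erase m).length - 1 := List.length_erase_of_mem hm2
  have hp : 0 < h.length := List.length_pos_of_mem hm
  have hp2 : 0 < (h.erase m).length := List.length_pos_of_mem hm2
  simp only [List.length_append, List.length_cons, List.length_nil]
  omega

def solution (scoville : List Int) (K : Int) : Int :=
  solGoA scoville K 0                                -- answer = 0; heapq.heapify(scoville)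

-- ===== PORT B =====
-- Source B consumes the two queues through front pointers i and j; the port carries the two
-- UNCONSUMED suffixes xs (= xs[i:]) and q (= merged[j:]) — advancing a pointer is taking the
-- tail, merged.append is appending at the back of q.
-- `m = merged[j] if i == len(xs) else (xs[i] if j == len(merged) else min(xs[i], merged[j]))`
def peekB (xs q : List Int) : Option Int :=
  match xs, q with
  | [], [] => none                                   -- merged[j] IndexError (outside Pre_)
  | [], c :: _ => some c
  | a :: _, [] => some a
  | a :: _, c :: _ => some (min a c)

-- the two identical pop steps `if i == len(xs) or (j < len(merged) and merged[j] < xs[i]) …`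
def popB (xs q : List Int) : Option (Int × List Int × List Int) :=
  match xs, q with
  | [], [] => none                                   -- merged[j] IndexError (outside Pre_)
  | [], c :: q' => some (c, [], q')
  | a :: xs', [] => some (a, xs', [])
  | a :: xs', c :: q' => if c < a then some (c, a :: xs', q') else some (a, xs', c :: q')

-- used by solGoB's termination proof
lemma popB_shape {xs q : List Int} {m : Int} {xs' q' : List Int}
    (h : popB xs q = some (m, xs', q')) :
    (xs = m :: xs' ∧ q' = q) ∨ (xs' = xs ∧ q = m :: q') := by
  cases xs with
  | nil => cases q <;> simp_all [popB]
  | cons a t =>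
    cases q with
    | nil => simp_all [popB]
    | cons c u =>
      simp only [popB] at h
      split at h <;> simp_all

-- used by solGoB's termination proof
lemma popB_length {xs q : List Int} {m : Int} {xs' q' : List Int}
    (h : popB xs q = some (m, xs', q')) : xs'.length + q'.length + 1 = xs.length + q.length := by
  rcases popB_shape h with ⟨he, rfl⟩ | ⟨rfl, he⟩ <;> rw [he] <;> simp <;> omega

def solGoB (xs q : List Int) (K answer : Int) : Int :=
  match peekB xs q with
  | none => 0                                        -- IndexError (outside Pre_)
  | some m =>
    if m < K then                                    -- `if m >= K: return answer` inverted
      match hp1 : popB xs q with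
      | none => 0                                    -- IndexError (outside Pre_)
      | some (a, xs1, q1) =>
        match hp2 : popB xs1 q1 with
        | none => 0                                  -- IndexError (outside Pre_)
        | some (b, xs2, q2) =>
          let q3 := q2 ++ [b * 2 + a]                -- merged.append(b * 2 + a)
          if xs2.length + q3.length = 1 ∧ (peekB xs2 q3).getD 0 < K then -1
          else solGoB xs2 q3 K (answer + 1)
    else answer
termination_by xs.length + q.length
decreasing_by
  have e1 := popB_length hp1
  have e2 := popB_length hp2
  simp only [List.length_append, List.length_cons, List.length_nil]
  omega

def solution_alt (scoville : List Int) (K : Int) : Int :=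
  solGoB (PySem.List.sorted scoville (fun x => x)) [] K 0   -- xs = sorted(scoville); merged = []

-- ===== PRECONDITION & SPEC =====
-- Pre_ excludes exactly the inputs where Python A raises IndexError: the empty list
-- (scoville[0]) and a single-element list whose element is below K (heappop of an empty heap);
-- Python B raises IndexError on exactly the same inputs (the empty-queue peek / second pop).
def Pre_solution (scoville : List Int) (K : Int) : Prop :=
  scoville ≠ [] ∧ (scoville.length = 1 → K ≤ scoville.headD 0)
instance (scoville : List Int) (K : Int) : Decidable (Pre_solution scoville K) := by
  unfold Pre_solution; infer_instance

def pvWitness_solution : List Int × Int := ([1, 2, 3, 9, 10, 12], 7)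

def Spec_solution (scoville : List Int) (K : Int) (out : Int) : Prop := out = solution_alt scoville K
instance (scoville : List Int) (K : Int) (out : Int) : Decidable (Spec_solution scoville K out) := by
  unfold Spec_solution; infer_instance

-- ===== CLAIM (what is proved, stated in full; the proofs are below) =====
def Claim_equal_solution : Prop := ∀ (scoville : List Int) (K : Int), Dom_solution scoville K → Pre_solution scoville K → Spec_solution scoville K (solution scoville K)

-- ===== LEMMAS AND PROOFS =====

-- The FIFO invariant: every value c still queued in q carries a witness v with c ≤ 3v where v is
-- a lower bound of everything that can still be popped before c (the sorted input queue xs and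
-- the already-popped earlier queue values, accumulated in pre).  It guarantees that the next
-- mixed value 2b + a (a, b the two current minima) is ≥ every queued c, so appending keeps q sorted.
def AuxB (xs pre : List Int) : List Int → Prop
  | [] => True
  | c :: rest => (∃ v, c ≤ 3 * v ∧ (∀ d ∈ xs, v ≤ d) ∧ (∀ d ∈ pre, v ≤ d)) ∧ AuxB xs (pre ++ [c]) rest

lemma auxB_mono {xs xs' pre pre' : List Int} : ∀ {q : List Int}, AuxB xs pre q →
    (∀ d ∈ xs', d ∈ xs) → (∀ d ∈ pre', d ∈ pre) → AuxB xs' pre' q := by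
  intro q
  induction q generalizing pre pre' with
  | nil => intro _ _ _; trivial
  | cons c rest ih =>
    rintro ⟨⟨v, hv3, hvx, hvp⟩, hrest⟩ hxs hpre
    refine ⟨⟨v, hv3, fun d hd => hvx d (hxs d hd), fun d hd => hvp d (hpre d hd)⟩, ?_⟩
    refine ih hrest hxs ?_
    intro d hd
    rcases List.mem_append.1 hd with h | h
    · exact List.mem_append.2 (Or.inl (hpre d h))
    · exact List.mem_append.2 (Or.inr h)

lemma auxB_append {xs : List Int} (x : Int) : ∀ {q pre : List Int}, AuxB xs pre q →
    (∃ v, x ≤ 3 * v ∧ (∀ d ∈ xs, v ≤ d) ∧ (∀ d ∈ pre, v ≤ d) ∧ (∀ d ∈ q, v ≤ d)) →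
    AuxB xs pre (q ++ [x]) := by
  intro q
  induction q with
  | nil =>
    rintro pre _ ⟨v, h3, hx, hp, _⟩
    exact ⟨⟨v, h3, hx, hp⟩, trivial⟩
  | cons c rest ih =>
    rintro pre ⟨hc, hrest⟩ ⟨v, h3, hx, hp, hq⟩
    refine ⟨hc, ih hrest ⟨v, h3, hx, ?_, ?_⟩⟩
    · intro d hd
      rcases List.mem_append.1 hd with h | h
      · exact hp d h
      · have hdc : d = c := by simpa using h
        subst hdc
        exact hq d (List.mem_cons_self ..)
    · intro d hd
      exact hq d (List.mem_cons_of_mem _ hd)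

lemma auxB_bound {xs : List Int} {c : Int} : ∀ {q pre : List Int}, AuxB xs pre q → c ∈ q →
    ∃ v, c ≤ 3 * v ∧ (∀ d ∈ xs, v ≤ d) ∧ (∀ d ∈ pre, v ≤ d) := by
  intro q
  induction q with
  | nil => intro pre _ hc; cases hc
  | cons c' rest ih =>
    rintro pre ⟨⟨v, h3, hx, hp⟩, hrest⟩ hc
    rcases List.mem_cons.1 hc with rfl | hc
    · exact ⟨v, h3, hx, hp⟩
    · obtain ⟨v, h3, hx, hp⟩ := ih hrest hc
      exact ⟨v, h3, hx, fun d hd => hp d (List.mem_append.2 (Or.inl hd))⟩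

-- popB on two sorted queues: none iff both empty; otherwise it pops the head of one queue and
-- that value is ≤ everything left in both.
lemma popB_none {xs q : List Int} : popB xs q = none ↔ (xs = [] ∧ q = []) := by
  cases xs <;> cases q <;> simp [popB] <;> split <;> simp

lemma popB_peekB {xs q : List Int} {m : Int} {xs' q' : List Int}
    (h : popB xs q = some (m, xs', q')) : peekB xs q = some m := by
  cases xs with
  | nil => cases q <;> simp_all [popB, peekB]
  | cons a t =>
    cases q with
    | nil => simp_all [popB, peekB]
    | cons c u =>
      simp only [popB] at h
      split at h <;> simp_all [peekB] <;> omega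

lemma popB_min {xs q : List Int} {m : Int} {xs' q' : List Int}
    (hxs : xs.Pairwise (· ≤ ·)) (hq : q.Pairwise (· ≤ ·))
    (h : popB xs q = some (m, xs', q')) :
    (∀ d ∈ xs', m ≤ d) ∧ (∀ d ∈ q', m ≤ d) := by
  cases xs with
  | nil =>
    cases q with
    | nil => simp_all [popB]
    | cons c u =>
      simp only [popB, Option.some.injEq, Prod.mk.injEq] at h
      obtain ⟨rfl, rfl, rfl⟩ := h
      exact ⟨by simp, fun d hd => List.rel_of_pairwise_cons hq hd⟩
  | cons a t =>
    cases q with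
    | nil =>
      simp only [popB, Option.some.injEq, Prod.mk.injEq] at h
      obtain ⟨rfl, rfl, rfl⟩ := h
      exact ⟨fun d hd => List.rel_of_pairwise_cons hxs hd, by simp⟩
    | cons c u =>
      simp only [popB] at h
      split at h <;>
        (simp only [Option.some.injEq, Prod.mk.injEq] at h; obtain ⟨rfl, rfl, rfl⟩ := h)
      · constructor
        · intro d hd
          rcases List.mem_cons.1 hd with rfl | hd
          · omega
          · have := List.rel_of_pairwise_cons hxs hd; omega
        · exact fun d hd => List.rel_of_pairwise_cons hq hd
      · constructor
        · exact fun d hd => List.rel_of_pairwise_cons hxs hd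
        · intro d hd
          rcases List.mem_cons.1 hd with rfl | hd
          · omega
          · have := List.rel_of_pairwise_cons hq hd; omega

lemma popB_perm {xs q : List Int} {m : Int} {xs' q' : List Int}
    (h : popB xs q = some (m, xs', q')) : (xs ++ q).Perm (m :: (xs' ++ q')) := by
  rcases popB_shape h with ⟨rfl, rfl⟩ | ⟨rfl, rfl⟩
  · rfl
  · exact List.perm_middle

-- min? of any permutation of a list whose minimum is m
lemma min?_of_perm_min {h l : List Int} {m : Int}
    (hp : h.Perm l) (hm : m ∈ l) (hmin : ∀ d ∈ l, m ≤ d) :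
    PySem.List.min? h (fun x => x) = some m := by
  cases hmm : PySem.List.min? h (fun x => x) with
  | none =>
    have : h = [] := (PySem.List.min?_eq_none_iff h _).1 hmm
    subst this
    exact absurd (hp.symm.mem_iff.1 hm) (by simp)
  | some m' =>
    have hmem : m' ∈ l := hp.mem_iff.1 (PySem.List.min?_mem hmm)
    have h1 : m ≤ m' := hmin m' hmem
    have h2 : m' ≤ m := PySem.List.min?_isMin hmm m (hp.mem_iff.2 hm)
    rw [show m' = m by omega]

-- unfolding lemmas for solGoB (one per branch of the Python loop body)
lemma solGoB_none {xs q : List Int} {K ans : Int} (h : peekB xs q = none) :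
    solGoB xs q K ans = 0 := by
  rw [solGoB.eq_def, h]

lemma solGoB_geq {xs q : List Int} {K ans m : Int} (h : peekB xs q = some m) (hK : ¬ m < K) :
    solGoB xs q K ans = ans := by
  rw [solGoB.eq_def, h]
  simp [hK]

lemma solGoB_pop2none {xs q : List Int} {K ans m a : Int} {xs1 q1 : List Int}
    (h : peekB xs q = some m) (hK : m < K)
    (hpop : popB xs q = some (a, xs1, q1)) (hpop2 : popB xs1 q1 = none) :
    solGoB xs q K ans = 0 := by
  rw [solGoB.eq_def, h]
  simp only [hK, if_true]
  split
  · rfl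
  · rename_i a' xs1' q1' heq
    rw [hpop] at heq
    obtain ⟨rfl, rfl, rfl⟩ : a = a' ∧ xs1 = xs1' ∧ q1 = q1' := by simpa using heq
    split
    · rfl
    · rename_i b' xs2' q2' heq2
      rw [hpop2] at heq2
      cases heq2

lemma solGoB_step {xs q : List Int} {K ans m a b : Int} {xs1 q1 xs2 q2 : List Int}
    (h : peekB xs q = some m) (hK : m < K)
    (hpop : popB xs q = some (a, xs1, q1)) (hpop2 : popB xs1 q1 = some (b, xs2, q2)) :
    solGoB xs q K ans =
      (if xs2.length + (q2 ++ [b * 2 + a]).length = 1 ∧ (peekB xs2 (q2 ++ [b * 2 + a])).getD 0 < K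
       then -1 else solGoB xs2 (q2 ++ [b * 2 + a]) K (ans + 1)) := by
  rw [solGoB.eq_def, h]
  simp only [hK, if_true]
  split
  · rename_i heq
    rw [hpop] at heq
    cases heq
  · rename_i a' xs1' q1' heq
    rw [hpop] at heq
    obtain ⟨rfl, rfl, rfl⟩ : a = a' ∧ xs1 = xs1' ∧ q1 = q1' := by simpa using heq
    split
    · rename_i heq2
      rw [hpop2] at heq2
      cases heq2
    · rename_i b' xs2' q2' heq2
      rw [hpop2] at heq2
      obtain ⟨rfl, rfl, rfl⟩ : b = b' ∧ xs2 = xs2' ∧ q2 = q2' := by simpa using heq2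
      rfl

-- the core simulation: the heap (as a multiset) and the two queues run in lockstep
lemma go_eq : ∀ (n : Nat) (h xs q : List Int) (K ans : Int),
    h.length ≤ n → h.Perm (xs ++ q) →
    xs.Pairwise (· ≤ ·) → q.Pairwise (· ≤ ·) → AuxB xs [] q →
    solGoA h K ans = solGoB xs q K ans := by
  intro n
  induction n with
  | zero =>
    intro h xs q K ans hlen hperm _ _ _
    have hh : h = [] := List.eq_nil_of_length_eq_zero (by omega)
    subst hh
    have hnil : xs ++ q = [] := hperm.symm.eq_nil
    have hx : xs = [] := by cases xs <;> simp_all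
    have hq : q = [] := by simp_all
    subst hx; subst hq
    rw [solGoA.eq_def, solGoB_none rfl]
    simp [PySem.List.min?]
  | succ n ih =>
    intro h xs q K ans hlen hperm hsx hsq hAux
    cases hpop : popB xs q with
    | none =>
      obtain ⟨rfl, rfl⟩ := popB_none.1 hpop
      have hh : h = [] := hperm.eq_nil
      subst hh
      rw [solGoA.eq_def, solGoB_none rfl]
      simp [PySem.List.min?]
    | some v =>
      obtain ⟨m, xs1, q1⟩ := v
      have hpk : peekB xs q = some m := popB_peekB hpop
      have hperm1 : h.Perm (m :: (xs1 ++ q1)) := hperm.trans (popB_perm hpop)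
      have hminA : PySem.List.min? h (fun x => x) = some m := by
        refine min?_of_perm_min hperm ((popB_perm hpop).symm.mem_iff.1 (List.mem_cons_self ..)) ?_
        intro d hd
        have hd' : d ∈ m :: (xs1 ++ q1) := (popB_perm hpop).mem_iff.1 hd
        rcases List.mem_cons.1 hd' with rfl | hd'
        · exact le_refl d
        · rcases List.mem_append.1 hd' with h1 | h1
          · exact (popB_min hsx hsq hpop).1 d h1
          · exact (popB_min hsx hsq hpop).2 d h1
      by_cases hK : m < K
      · -- one pass through the loop body on both sides
        have hpermE : (h.erase m).Perm (xs1 ++ q1) := by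
          have := hperm1.erase m
          rwa [List.erase_cons_head] at this
        have hshape1 := popB_shape hpop
        have hsx1 : xs1.Pairwise (· ≤ ·) := by
          rcases hshape1 with ⟨he, _⟩ | ⟨rfl, _⟩
          · rw [he] at hsx; exact (List.pairwise_cons.1 hsx).2
          · exact hsx
        have hsq1 : q1.Pairwise (· ≤ ·) := by
          rcases hshape1 with ⟨_, rfl⟩ | ⟨_, he⟩
          · exact hsq
          · rw [he] at hsq; exact (List.pairwise_cons.1 hsq).2
        cases hpop2 : popB xs1 q1 with
        | none =>
          obtain ⟨rfl, rfl⟩ := popB_none.1 hpop2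
          have hEnil : h.erase m = [] := hpermE.eq_nil
          have hmin2 : PySem.List.min? (h.erase m) (fun x => x) = none := by
            rw [hEnil]
            rfl
          rw [solGoA.eq_def, hminA, solGoB_pop2none hpk hK hpop hpop2]
          simp only [hK, if_true]
          rw [hmin2]
        | some v2 =>
          obtain ⟨b, xs2, q2⟩ := v2
          have hperm2 : (h.erase m).Perm (b :: (xs2 ++ q2)) := hpermE.trans (popB_perm hpop2)
          have hminA2 : PySem.List.min? (h.erase m) (fun x => x) = some b := by
            refine min?_of_perm_min hpermE ((popB_perm hpop2).symm.mem_iff.1 (List.mem_cons_self ..)) ?_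
            intro d hd
            have hd' : d ∈ b :: (xs2 ++ q2) := (popB_perm hpop2).mem_iff.1 hd
            rcases List.mem_cons.1 hd' with rfl | hd'
            · exact le_refl d
            · rcases List.mem_append.1 hd' with h1 | h1
              · exact (popB_min hsx1 hsq1 hpop2).1 d h1
              · exact (popB_min hsx1 hsq1 hpop2).2 d h1
          set x := b * 2 + m with hxdef
          set q3 := q2 ++ [x] with hq3
          set hA2 := ((h.erase m).erase b) ++ [x] with hhA2
          have hpermE2 : ((h.erase m).erase b).Perm (xs2 ++ q2) := by
            have := hperm2.erase b
            rwa [List.erase_cons_head] at this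
          have hperm3 : hA2.Perm (xs2 ++ q3) := by
            have := hpermE2.append_right [x]
            rw [hq3, ← List.append_assoc]
            exact this
          have hshape2 := popB_shape hpop2
          have hmb : m ≤ b := by
            have hbmem : b ∈ xs1 ++ q1 := by
              rcases hshape2 with ⟨he, _⟩ | ⟨_, he⟩
              · rw [he]; exact List.mem_append.2 (Or.inl (List.mem_cons_self ..))
              · rw [he]; exact List.mem_append.2 (Or.inr (List.mem_cons_self ..))
            rcases List.mem_append.1 hbmem with h1 | h1
            · exact (popB_min hsx hsq hpop).1 b h1
            · exact (popB_min hsx hsq hpop).2 b h1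
          have hbmin := popB_min hsx1 hsq1 hpop2
          -- AuxB after the two pops, with the q-popped values accumulated in pre2
          have hAux2 : ∃ pre2 : List Int, AuxB xs pre2 q2 ∧
              (m ∈ xs ∨ m ∈ pre2) ∧ (b ∈ xs ∨ b ∈ pre2) ∧ (∀ d ∈ xs2, d ∈ xs) := by
            rcases hshape1 with ⟨he1, hq1e⟩ | ⟨hxs1e, he1⟩
            · -- first pop from xs : xs = m :: xs1, q1 = q
              subst hq1e
              rcases hshape2 with ⟨he2, hq2e⟩ | ⟨hxs2e, he2⟩
              · subst hq2e
                refine ⟨[], hAux, Or.inl (by rw [he1]; simp),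
                  Or.inl (by rw [he1, he2]; simp), fun d hd => by rw [he1, he2]; simp [hd]⟩
              · subst hxs2e
                rw [he2] at hAux
                refine ⟨[b], auxB_mono hAux.2 (fun d hd => hd) (by simp),
                  Or.inl (by rw [he1]; simp), Or.inr (by simp),
                  fun d hd => by rw [he1]; simp [hd]⟩
            · -- first pop from q : xs1 = xs, q = m :: q1
              rw [he1] at hAux
              have hAux1 : AuxB xs [m] q1 := hAux.2
              rcases hshape2 with ⟨he2, hq2e⟩ | ⟨hxs2e, he2⟩
              · subst hq2e
                refine ⟨[m], hAux1, Or.inr (by simp), Or.inl ?_, ?_⟩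
                · rw [← hxs1e, he2]; simp
                · intro d hd; rw [← hxs1e, he2]; simp [hd]
              · rw [he2] at hAux1
                refine ⟨[m, b], auxB_mono hAux1.2 (fun d hd => hd)
                    (by intro d hd; simp at hd ⊢; tauto),
                  Or.inr (by simp), Or.inr (by simp), ?_⟩
                intro d hd
                rw [← hxs1e]
                rw [hxs2e] at hd
                exact hd
          obtain ⟨pre2, hAux2, hma, hmbm, hxs2sub⟩ := hAux2
          -- every queued c is ≤ x, so q3 stays sorted
          have hqle : ∀ c ∈ q2, c ≤ x := by
            intro c hc
            obtain ⟨v, h3, hvx, hvp⟩ := auxB_bound hAux2 hc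
            have hvm : v ≤ m := by rcases hma with h1 | h1; exacts [hvx m h1, hvp m h1]
            have hvb : v ≤ b := by rcases hmbm with h1 | h1; exacts [hvx b h1, hvp b h1]
            omega
          have hsx2 : xs2.Pairwise (· ≤ ·) := by
            rcases hshape2 with ⟨he, _⟩ | ⟨rfl, _⟩
            · rw [he] at hsx1; exact (List.pairwise_cons.1 hsx1).2
            · exact hsx1
          have hsq2 : q2.Pairwise (· ≤ ·) := by
            rcases hshape2 with ⟨_, rfl⟩ | ⟨_, he⟩
            · exact hsq1
            · rw [he] at hsq1; exact (List.pairwise_cons.1 hsq1).2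
          have hsq3 : q3.Pairwise (· ≤ ·) := by
            rw [hq3, List.pairwise_append]
            refine ⟨hsq2, by simp, ?_⟩
            intro a' ha' b' hb'
            simp only [List.mem_singleton] at hb'
            subst hb'
            exact hqle a' ha'
          have hAux3 : AuxB xs2 [] q3 :=
            auxB_append x (auxB_mono hAux2 hxs2sub (by simp))
              ⟨b, by omega, hbmin.1, by simp, hbmin.2⟩
          have hlen3 : hA2.length = xs2.length + q3.length := by
            have := hperm3.length_eq
            simpa using this
          have hlenh : h.length = xs2.length + q2.length + 2 := by
            have e1 := hperm1.length_eq
            have e2 := hperm2.length_eq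
            simp only [List.length_cons, List.length_append] at e1 e2
            have e3 : (h.erase m).length = h.length - 1 :=
              List.length_erase_of_mem (hperm1.mem_iff.2 (List.mem_cons_self ..))
            omega
          have hq3len : q3.length = q2.length + 1 := by simp [hq3]
          have hcond : (hA2.length = 1 ∧ hA2.headD 0 < K) ↔
              (xs2.length + q3.length = 1 ∧ (peekB xs2 q3).getD 0 < K) := by
            by_cases hL : xs2.length + q3.length = 1
            · have hxs2nil : xs2 = [] := List.eq_nil_of_length_eq_zero (by omega)
              have hq2nil : q2 = [] := List.eq_nil_of_length_eq_zero (by omega)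
              have herasenil : (h.erase m).erase b = [] := by
                refine List.eq_nil_of_length_eq_zero ?_
                have := hpermE2.length_eq
                rw [hxs2nil, hq2nil] at this
                simpa using this
              have hhA2x : hA2 = [x] := by rw [hhA2, herasenil]; rfl
              rw [hhA2x, hq3, hxs2nil, hq2nil]
              simp [peekB]
            · constructor
              · intro hcc; exact absurd (by omega : xs2.length + q3.length = 1) hL
              · intro hcc; exact absurd hcc.1 hL
          rw [solGoA.eq_def, hminA, solGoB_step hpk hK hpop hpop2]
          simp only [hK, if_true]
          rw [hminA2]
          simp only [← hxdef, ← hq3, ← hhA2]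
          by_cases hc : xs2.length + q3.length = 1 ∧ (peekB xs2 q3).getD 0 < K
          · rw [if_pos (hcond.2 hc), if_pos hc]
          · rw [if_neg (fun hca => hc (hcond.1 hca)), if_neg hc]
            exact ih hA2 xs2 q3 K (ans + 1) (by omega) hperm3 hsx2 hsq3 hAux3
      · rw [solGoA.eq_def, hminA, solGoB_geq hpk hK]
        simp [hK]

-- ===== VERDICT (by name: the statement is the Claim_ definition above) =====
theorem solution_spec : Claim_equal_solution := by
  intro scoville K _ _
  unfold Spec_solution solution solution_alt
  exact go_eq scoville.length scoville _ [] K 0 le_rfl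
    (by simpa using (PySem.List.sorted_perm scoville _ _).symm)
    (PySem.List.sorted_pairwise scoville _) List.Pairwise.nil trivial
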